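-- pv_equiv track=rewrite | github.com/CathyF9600/HMM-Part-of-Speech-Tagging | tagger.py | split_into_sentences_train
-- ===== SOURCE A (Python) =====
-- def split_into_sentences_train(words, tags):
--     sentence_words = []
--     sentence_tags = []
--     current_sentence_words = []
--     current_sentence_tags = []
--
--     for i in range(len(words)):
--         word = words[i]
--         tag = tags[i]
--
--         # If word is not end of sentence punctuation, add it to the current sentence
--         if not word.endswith((".", "?", "!")):
--             current_sentence_words.append(word)
--             current_sentence_tags.append(tag)
--
--         # If word is end of sentence punctuation, add the current sentence to the list of sentences
--         # and start a new current sentence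
--         else:
--             current_sentence_words.append(word)
--             current_sentence_tags.append(tag)
--             sentence_words.append(current_sentence_words)
--             sentence_tags.append(current_sentence_tags)
--             current_sentence_words = []
--             current_sentence_tags = []
--
--     # If there is a current sentence at the end, add it to the list of sentences
--     if current_sentence_words:
--         sentence_words.append(current_sentence_words)
--         sentence_tags.append(current_sentence_tags)
--
--     return sentence_words, sentence_tags
-- ===== SOURCE B (Python) =====
-- def split_into_sentences_train(words, tags):
--     n = len(words)
--     boundaries = [i for i, w in enumerate(words) if w.endswith((".", "?", "!"))]
--     sentence_words = []
--     sentence_tags = []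
--     start = 0
--     for b in boundaries:
--         sentence_words.append(words[start:b + 1])
--         sentence_tags.append(tags[start:b + 1])
--         start = b + 1
--     if start < n:
--         sentence_words.append(words[start:])
--         sentence_tags.append(tags[start:n])
--     return sentence_words, sentence_tags
-- ===== Notes on version B (the rewrite author's own statement) =====
-- stated objective: alternative
-- what changed: B first collects the boundary indices (words ending in '.', '?' or '!') in one scan and then emits each sentence as a slice between consecutive boundaries, instead of A's per-word accumulate-and-flush state machine.
import Mathlib
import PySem

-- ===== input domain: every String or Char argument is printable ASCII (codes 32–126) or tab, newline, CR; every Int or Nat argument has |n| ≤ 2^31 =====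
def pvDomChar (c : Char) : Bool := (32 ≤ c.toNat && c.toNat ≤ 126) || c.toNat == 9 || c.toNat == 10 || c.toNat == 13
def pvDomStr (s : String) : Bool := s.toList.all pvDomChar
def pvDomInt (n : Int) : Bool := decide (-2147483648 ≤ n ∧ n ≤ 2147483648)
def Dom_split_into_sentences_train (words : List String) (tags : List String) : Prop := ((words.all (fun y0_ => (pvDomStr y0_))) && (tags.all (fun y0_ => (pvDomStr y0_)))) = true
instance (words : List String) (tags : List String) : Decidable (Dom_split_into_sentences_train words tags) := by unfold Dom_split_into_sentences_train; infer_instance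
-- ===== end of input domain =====

-- B replaces A's per-word flush loop by a boundary-index scan followed by slicing (a different
-- decomposition of the same task; equal return values are proved below on Pre_).

-- shared helper: word.endswith((".", "?", "!"))
def pvSentEnd (w : String) : Bool :=
  PySem.Str.endswith w "." || PySem.Str.endswith w "?" || PySem.Str.endswith w "!"

-- ===== PORT A =====
-- loop body of A's for-loop (state = (sentence_words, sentence_tags, current_sentence_words, current_sentence_tags))
def pvStepA (words tags : List String)
    (acc : List (List String) × List (List String) × List String × List String) (i : Int) :
    List (List String) × List (List String) × List String × List String :=
  let word := PySem.List.pyGetD words i ""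
  let tag := PySem.List.pyGetD tags i ""
  if ¬ pvSentEnd word then
    (acc.1, acc.2.1, acc.2.2.1 ++ [word], acc.2.2.2 ++ [tag])
  else
    (acc.1 ++ [acc.2.2.1 ++ [word]], acc.2.1 ++ [acc.2.2.2 ++ [tag]], [], [])

def split_into_sentences_train (words : List String) (tags : List String) :
    List (List String) × List (List String) :=
  let r := (PySem.List.pyRange 0 (words.length : Int) 1).foldl (pvStepA words tags) ([], [], [], [])
  if r.2.2.1 ≠ [] then (r.1 ++ [r.2.2.1], r.2.1 ++ [r.2.2.2]) else (r.1, r.2.1)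

-- ===== PORT B =====
-- loop body of B's for-loop over the boundary list (state = (sentence_words, sentence_tags, start))
def pvStepB (words tags : List String)
    (acc : List (List String) × List (List String) × Int) (b : Int) :
    List (List String) × List (List String) × Int :=
  (acc.1 ++ [PySem.List.slice words (some acc.2.2) (some (b + 1))],
   acc.2.1 ++ [PySem.List.slice tags (some acc.2.2) (some (b + 1))],
   b + 1)

def split_into_sentences_train_alt (words : List String) (tags : List String) :
    List (List String) × List (List String) :=
  let n : Int := (words.length : Int)
  let boundaries := ((PySem.List.enumerate words 0).filter (fun p => pvSentEnd p.2)).map (fun p => p.1)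
  let r := boundaries.foldl (pvStepB words tags) ([], [], 0)
  if r.2.2 < n then
    (r.1 ++ [PySem.List.slice words (some r.2.2) none],
     r.2.1 ++ [PySem.List.slice tags (some r.2.2) (some n)])
  else (r.1, r.2.1)

-- ===== PRECONDITION & SPEC =====
-- A reads tags[i] for every i < len(words): it raises IndexError exactly when tags is shorter than words.
def Pre_split_into_sentences_train (words : List String) (tags : List String) : Prop :=
  words.length ≤ tags.length
instance (words : List String) (tags : List String) : Decidable (Pre_split_into_sentences_train words tags) := by unfold Pre_split_into_sentences_train; infer_instance

def pvWitness_split_into_sentences_train : List String × List String :=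
  (["hi", "there.", "yes"], ["N", "P", "V"])

def Spec_split_into_sentences_train (words : List String) (tags : List String) (out : List (List String) × List (List String)) : Prop := out = split_into_sentences_train_alt words tags
instance (words : List String) (tags : List String) (out : List (List String) × List (List String)) : Decidable (Spec_split_into_sentences_train words tags out) := by unfold Spec_split_into_sentences_train; infer_instance

-- ===== CLAIM (what is proved, stated in full; the proofs are below) =====
def Claim_equal_split_into_sentences_train : Prop := ∀ (words : List String) (tags : List String), Dom_split_into_sentences_train words tags → Pre_split_into_sentences_train words tags → Spec_split_into_sentences_train words tags (split_into_sentences_train words tags)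

-- ===== LEMMAS AND PROOFS =====

-- reference: chunks of the zipped word/tag stream, first chunk open with accumulators cw/ct
def pvChunks : List (String × String) → List String → List String → List (List String) × List (List String)
  | [], cw, ct => if cw = [] then ([], []) else ([cw], [ct])
  | (w, t) :: rest, cw, ct =>
    if pvSentEnd w then
      let r := pvChunks rest [] []
      ((cw ++ [w]) :: r.1, (ct ++ [t]) :: r.2)
    else pvChunks rest (cw ++ [w]) (ct ++ [t])

lemma pvChunks_nil (cw ct : List String) :
    pvChunks [] cw ct = if cw = [] then ([], []) else ([cw], [ct]) := rfl

lemma pvChunks_cons_end {w : String} (he : pvSentEnd w = true) (t : String)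
    (rest : List (String × String)) (cw ct : List String) :
    pvChunks ((w, t) :: rest) cw ct
      = ((cw ++ [w]) :: (pvChunks rest [] []).1, (ct ++ [t]) :: (pvChunks rest [] []).2) := by
  simp only [pvChunks, he, if_true]

lemma pvChunks_cons_mid {w : String} (he : pvSentEnd w = false) (t : String)
    (rest : List (String × String)) (cw ct : List String) :
    pvChunks ((w, t) :: rest) cw ct = pvChunks rest (cw ++ [w]) (ct ++ [t]) := by
  simp only [pvChunks, he, if_false, Bool.false_eq_true]

-- the code after each loop (same expressions the ports end with)
def pvFinA (r : List (List String) × List (List String) × List String × List String) :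
    List (List String) × List (List String) :=
  if r.2.2.1 ≠ [] then (r.1 ++ [r.2.2.1], r.2.1 ++ [r.2.2.2]) else (r.1, r.2.1)

def pvFinB (W T : List String) (r : List (List String) × List (List String) × Int) :
    List (List String) × List (List String) :=
  if r.2.2 < (W.length : Int) then
    (r.1 ++ [PySem.List.slice W (some r.2.2) none],
     r.2.1 ++ [PySem.List.slice T (some r.2.2) (some (W.length : Int))])
  else (r.1, r.2.1)

lemma pvA_main (W T : List String) (hT : W.length ≤ T.length) :
    ∀ (l : List String) (s : Nat), l = W.drop s →
    ∀ sw stg cw ct,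
    pvFinA ((PySem.List.pyRange (s : Int) (W.length : Int) 1).foldl (pvStepA W T) (sw, stg, cw, ct))
      = (sw ++ (pvChunks (l.zip (T.drop s)) cw ct).1,
         stg ++ (pvChunks (l.zip (T.drop s)) cw ct).2) := by
  intro l
  induction l with
  | nil =>
    intro s hs sw stg cw ct
    rw [PySem.List.pyRange_one_eq_nil
      (by exact_mod_cast (by simpa using List.drop_eq_nil_iff.mp hs.symm : W.length ≤ s))]
    rw [List.foldl_nil, List.zip_nil_left, pvChunks_nil]
    by_cases hcw : cw = [] <;> simp [pvFinA, hcw]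
  | cons w rest ih =>
    intro s hs sw stg cw ct
    have hlt : s < W.length := by
      by_contra h
      rw [List.drop_eq_nil_iff.mpr (by omega)] at hs
      exact List.cons_ne_nil w rest hs
    have hltT : s < T.length := lt_of_lt_of_le hlt hT
    have hwEq : W[s] = w := by
      have h0 : (W.drop s)[0]'(by simp; omega) = w := by simp [← hs]
      simpa using h0
    have hrest : rest = W.drop (s + 1) := by
      have h1 : (W.drop s).tail = rest := by rw [← hs, List.tail_cons]
      simpa [List.tail_drop] using h1.symm
    have hTs : T.drop s = T[s] :: T.drop (s + 1) := List.drop_eq_getElem_cons hltT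
    have hcast : (s : Int) + 1 = ((s + 1 : Nat) : Int) := by push_cast; ring
    rw [PySem.List.pyRange_one_cons (by exact_mod_cast hlt), List.foldl_cons]
    by_cases he : pvSentEnd w
    · have hstep : pvStepA W T (sw, stg, cw, ct) (s : Int)
          = (sw ++ [cw ++ [w]], stg ++ [ct ++ [T[s]]], [], []) := by
        simp [pvStepA, PySem.List.pyGetD_natCast, List.getD_eq_getElem?_getD, hwEq,
          List.getElem?_eq_getElem hlt, List.getElem?_eq_getElem hltT, he]
      rw [hstep, hcast, ih (s + 1) hrest, hTs, List.zip_cons_cons, pvChunks_cons_end he]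
      simp
    · have he' : pvSentEnd w = false := by simpa using he
      have hstep : pvStepA W T (sw, stg, cw, ct) (s : Int)
          = (sw, stg, cw ++ [w], ct ++ [T[s]]) := by
        simp [pvStepA, PySem.List.pyGetD_natCast, List.getD_eq_getElem?_getD, hwEq,
          List.getElem?_eq_getElem hlt, List.getElem?_eq_getElem hltT, he']
      rw [hstep, hcast, ih (s + 1) hrest, hTs, List.zip_cons_cons, pvChunks_cons_mid he']

lemma pvB_main (W T : List String) (hT : W.length ≤ T.length) :
    ∀ (l : List String) (s : Nat), l = W.drop s → s ≤ W.length →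
    ∀ (s0 : Nat), s0 ≤ s →
    ∀ sw stg,
    pvFinB W T ((((PySem.List.enumerate l (s : Int)).filter (fun p => pvSentEnd p.2)).map (fun p => p.1)).foldl
        (pvStepB W T) (sw, stg, (s0 : Int)))
      = (sw ++ (pvChunks (l.zip (T.drop s)) ((W.drop s0).take (s - s0)) ((T.drop s0).take (s - s0))).1,
         stg ++ (pvChunks (l.zip (T.drop s)) ((W.drop s0).take (s - s0)) ((T.drop s0).take (s - s0))).2) := by
  intro l
  induction l with
  | nil =>
    intro s hs hsle s0 hs0 sw stg
    have hseq : s = W.length :=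
      le_antisymm hsle (by simpa using List.drop_eq_nil_iff.mp hs.symm)
    simp only [PySem.List.enumerate_nil, List.filter_nil, List.map_nil, List.foldl_nil]
    rw [List.zip_nil_left, pvChunks_nil]
    by_cases h0 : s0 < W.length
    · have hne : (W.drop s0).take (s - s0) ≠ [] := by
        cases hd : W.drop s0 with
        | nil => exact absurd (by simpa using List.drop_eq_nil_iff.mp hd) (by omega)
        | cons a as => simp; omega
      have htake : (W.drop s0).take (s - s0) = W.drop s0 := by
        apply List.take_of_length_le; simp; omega
      have htakeT : PySem.List.slice T (some (s0 : Int)) (some (W.length : Int))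
          = (T.drop s0).take (s - s0) := by
        rw [PySem.List.slice_natCast, hseq]
      rw [pvFinB]
      dsimp only
      rw [if_pos (show (s0 : Int) < (W.length : Int) by exact_mod_cast h0),
        PySem.List.slice_from_natCast, htakeT, if_neg hne, htake]
    · have hs0eq : s0 = s := by omega
      have hempty : (W.drop s0).take (s - s0) = [] := by simp [hs0eq]
      rw [pvFinB]
      dsimp only
      rw [if_neg (show ¬ (s0 : Int) < (W.length : Int) by omega), if_pos hempty]
      simp
  | cons w rest ih =>
    intro s hs hsle s0 hs0 sw stg
    have hlt : s < W.length := by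
      by_contra h
      rw [List.drop_eq_nil_iff.mpr (by omega)] at hs
      exact List.cons_ne_nil w rest hs
    have hltT : s < T.length := lt_of_lt_of_le hlt hT
    have hwEq : W[s] = w := by
      have h0 : (W.drop s)[0]'(by simp; omega) = w := by simp [← hs]
      simpa using h0
    have hrest : rest = W.drop (s + 1) := by
      have h1 : (W.drop s).tail = rest := by rw [← hs, List.tail_cons]
      simpa [List.tail_drop] using h1.symm
    have hTs : T.drop s = T[s] :: T.drop (s + 1) := List.drop_eq_getElem_cons hltT
    have hcast : (s : Int) + 1 = ((s + 1 : Nat) : Int) := by push_cast; ring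
    have htakeW : (W.drop s0).take (s + 1 - s0) = (W.drop s0).take (s - s0) ++ [w] := by
      have h1 : s + 1 - s0 = (s - s0) + 1 := by omega
      have h2 : (W.drop s0)[s - s0]? = some w := by
        rw [List.getElem?_drop, (by omega : s0 + (s - s0) = s), List.getElem?_eq_getElem hlt, hwEq]
      rw [h1, List.take_add_one, h2]; rfl
    have htakeT : (T.drop s0).take (s + 1 - s0) = (T.drop s0).take (s - s0) ++ [T[s]] := by
      have h1 : s + 1 - s0 = (s - s0) + 1 := by omega
      have h2 : (T.drop s0)[s - s0]? = some T[s] := by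
        rw [List.getElem?_drop, (by omega : s0 + (s - s0) = s), List.getElem?_eq_getElem hltT]
      rw [h1, List.take_add_one, h2]; rfl
    rw [PySem.List.enumerate_cons, List.filter_cons]
    by_cases he : pvSentEnd w
    · rw [if_pos (by simpa using he), List.map_cons, List.foldl_cons]
      have hstep : pvStepB W T (sw, stg, (s0 : Int)) (s : Int)
          = (sw ++ [(W.drop s0).take (s + 1 - s0)], stg ++ [(T.drop s0).take (s + 1 - s0)],
             ((s + 1 : Nat) : Int)) := by
        simp only [pvStepB, hcast, PySem.List.slice_natCast]
      rw [hstep, hcast, ih (s + 1) hrest (by omega) (s + 1) (le_refl _),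
        hTs, List.zip_cons_cons, pvChunks_cons_end he, htakeW, htakeT]
      simp
    · have he' : pvSentEnd w = false := by simpa using he
      rw [if_neg (by simp [he']), hcast, ih (s + 1) hrest (by omega) s0 (by omega),
        hTs, List.zip_cons_cons, pvChunks_cons_mid he', htakeW, htakeT]

-- ===== VERDICT (by name: the statement is the Claim_ definition above) =====
theorem split_into_sentences_train_spec : Claim_equal_split_into_sentences_train := by
  intro words tags _ hpre
  unfold Spec_split_into_sentences_train
  have hA := pvA_main words tags hpre words 0 (by simp) [] [] [] []
  have hB := pvB_main words tags hpre words 0 (by simp) (by omega) 0 (le_refl _) [] []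
  unfold split_into_sentences_train split_into_sentences_train_alt
  exact hA.trans hB.symm
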